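-- pv_equiv track=rewrite | github.com/rageshn/AlgoExpert | Strings/longest-palindromic-subsequence.py | traverse_outwards_even
-- ===== SOURCE A (Python) =====
-- def traverse_outwards_even(i, j, string, subsequence):
--     if i < 0 or j > len(string) - 1:
--         return subsequence
--
--     if string[i] != string[j]:
--         return subsequence
--
--     while string[i] == string[j]:
--         subsequence = string[i] + subsequence + string[j]
--         return traverse_outwards_even(i - 1, j + 1, string, subsequence)
-- ===== SOURCE B (Python) =====
-- def traverse_outwards_even(i, j, string, subsequence):
--     # Stage 1: count how many expansion steps match; Stage 2: build the result in one shot.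
--     k = 0
--     while i - k >= 0 and j + k <= len(string) - 1 and string[i - k] == string[j + k]:
--         k += 1
--     left = ''.join(string[i - k + 1 + t] for t in range(k))
--     right = ''.join(string[j + t] for t in range(k))
--     return left + subsequence + right
-- ===== Notes on version B (the rewrite author's own statement) =====
-- stated objective: alternative
-- what changed: Replaced the recursive accumulator (which rebuilds the growing subsequence at every step) by a two-stage algorithm: first an index-only loop counts the number k of matching expansion steps, then the result is assembled in one shot from two range(k) joins around the untouched subsequence.
import Mathlib
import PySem

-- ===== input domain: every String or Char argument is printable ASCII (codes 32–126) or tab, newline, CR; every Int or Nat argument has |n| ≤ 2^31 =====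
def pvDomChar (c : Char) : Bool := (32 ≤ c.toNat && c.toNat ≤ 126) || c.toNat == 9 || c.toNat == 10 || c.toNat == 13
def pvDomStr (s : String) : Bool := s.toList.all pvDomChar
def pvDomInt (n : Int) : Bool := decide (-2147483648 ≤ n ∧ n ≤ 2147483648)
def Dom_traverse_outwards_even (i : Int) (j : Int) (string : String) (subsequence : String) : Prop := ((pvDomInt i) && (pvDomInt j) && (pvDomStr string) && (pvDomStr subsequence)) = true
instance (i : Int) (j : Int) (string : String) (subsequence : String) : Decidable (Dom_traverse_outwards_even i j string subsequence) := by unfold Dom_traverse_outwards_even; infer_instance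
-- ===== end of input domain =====

-- B replaces A's recursive accumulator by a two-stage algorithm: count the matching expansion steps, then build the result in one shot around the untouched subsequence.


-- ===== PORT A =====
-- Literal port of A: two early returns, then the (once-executed) while body builds
-- string[i] + subsequence + string[j] and recurses. The Nat fuel only totalises the
-- recursion (it is (len - j).toNat + 1, exactly enough: j increases by 1 each call and
-- the recursion stops once j > len - 1). On an IndexError input (excluded by Pre_)
-- the port returns subsequence.
def traverse_outwards_even_go (fuel : Nat) (i : Int) (j : Int) (string : String) (subsequence : String) : String :=
  match fuel with
  | 0 => subsequence
  | fuel + 1 =>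
    if i < 0 ∨ j > PySem.Str.len string - 1 then subsequence
    else
      match PySem.Str.pyGet? string i, PySem.Str.pyGet? string j with
      | some ci, some cj =>
          if ci ≠ cj then subsequence
          else traverse_outwards_even_go fuel (i - 1) (j + 1) string
                 (String.ofList (ci :: subsequence.toList ++ [cj]))
      | _, _ => subsequence   -- Python raises IndexError here (outside Pre_)

def traverse_outwards_even (i : Int) (j : Int) (string : String) (subsequence : String) : String :=
  traverse_outwards_even_go ((PySem.Str.len string - j).toNat + 1) i j string subsequence

-- ===== PORT B =====
-- Port of B, stage 1: the index-only counting while-loop (same fuel totalisation: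
-- k grows by 1 per step and the guard fails once j + k > len - 1).
def traverse_outwards_even_altCount (fuel : Nat) (i : Int) (j : Int) (string : String) (k : Int) : Int :=
  match fuel with
  | 0 => k
  | fuel + 1 =>
    if i - k ≥ 0 ∧ j + k ≤ PySem.Str.len string - 1 then
      match PySem.Str.pyGet? string (i - k), PySem.Str.pyGet? string (j + k) with
      | some a, some b =>
          if a = b then traverse_outwards_even_altCount fuel i j string (k + 1) else k
      | _, _ => k   -- Python raises IndexError here (outside Pre_)
    else k

-- Port of B, stage 2: the two ''.join(... for t in range(k)) builders and the final
-- concatenation (filterMap: each generator element is the character string[...]).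
def traverse_outwards_even_alt (i : Int) (j : Int) (string : String) (subsequence : String) : String :=
  let k := traverse_outwards_even_altCount ((PySem.Str.len string - j).toNat + 1) i j string 0
  let left := (PySem.List.pyRange 0 k 1).filterMap (fun t => PySem.Str.pyGet? string (i - k + 1 + t))
  let right := (PySem.List.pyRange 0 k 1).filterMap (fun t => PySem.Str.pyGet? string (j + t))
  String.ofList (left ++ subsequence.toList ++ right)

-- ===== PRECONDITION & SPEC =====
-- Pre_ excludes exactly the inputs where Python A raises IndexError: the guards
-- pass (i ≥ 0 and j ≤ len-1) but string[i] or string[j] is out of range.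
def Pre_traverse_outwards_even (i : Int) (j : Int) (string : String) (subsequence : String) : Prop :=
  i < 0 ∨ j > PySem.Str.len string - 1 ∨ (i < PySem.Str.len string ∧ -(PySem.Str.len string) ≤ j)
instance (i : Int) (j : Int) (string : String) (subsequence : String) : Decidable (Pre_traverse_outwards_even i j string subsequence) := by unfold Pre_traverse_outwards_even; infer_instance

def pvWitness_traverse_outwards_even : Int × Int × String × String := (1, 2, "abba", "")

def Spec_traverse_outwards_even (i : Int) (j : Int) (string : String) (subsequence : String) (out : String) : Prop := out = traverse_outwards_even_alt i j string subsequence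
instance (i : Int) (j : Int) (string : String) (subsequence : String) (out : String) : Decidable (Spec_traverse_outwards_even i j string subsequence out) := by unfold Spec_traverse_outwards_even; infer_instance

-- ===== CLAIM (what is proved, stated in full; the proofs are below) =====
def Claim_equal_traverse_outwards_even : Prop := ∀ (i : Int) (j : Int) (string : String) (subsequence : String), Dom_traverse_outwards_even i j string subsequence → Pre_traverse_outwards_even i j string subsequence → Spec_traverse_outwards_even i j string subsequence (traverse_outwards_even i j string subsequence)

-- ===== LEMMAS AND PROOFS =====

-- Number of expansion steps A performs (proof-side shadow of both programs).
def pvCnt : Nat → Int → Int → String → Int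
  | 0, _, _, _ => 0
  | fuel + 1, i, j, s =>
    if i < 0 ∨ j > PySem.Str.len s - 1 then 0
    else
      match PySem.Str.pyGet? s i, PySem.Str.pyGet? s j with
      | some a, some b => if a = b then pvCnt fuel (i - 1) (j + 1) s + 1 else 0
      | _, _ => 0

theorem pvCnt_nonneg (fuel : Nat) (i j : Int) (s : String) : 0 ≤ pvCnt fuel i j s := by
  induction fuel generalizing i j with
  | zero => simp [pvCnt]
  | succ n ih =>
    rw [pvCnt]
    split_ifs with h
    · exact le_refl 0
    · cases hi : PySem.Str.pyGet? s i with
      | none => exact le_refl 0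
      | some a =>
        cases hj : PySem.Str.pyGet? s j with
        | none => exact le_refl 0
        | some b =>
          simp only
          split_ifs with he
          · have := ih (i - 1) (j + 1); omega
          · exact le_refl 0

-- B's counting loop equals k plus the shadow count at the shifted indices.
theorem altCount_eq_cnt (fuel : Nat) (i j : Int) (s : String) (k : Int) :
    traverse_outwards_even_altCount fuel i j s k = k + pvCnt fuel (i - k) (j + k) s := by
  induction fuel generalizing k with
  | zero => simp [traverse_outwards_even_altCount, pvCnt]
  | succ n ih =>
    rw [traverse_outwards_even_altCount, pvCnt]
    by_cases hg : i - k ≥ 0 ∧ j + k ≤ PySem.Str.len s - 1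
    · rw [if_pos hg, if_neg (by omega)]
      cases hi : PySem.Str.pyGet? s (i - k) with
      | none => simp
      | some a =>
        cases hj : PySem.Str.pyGet? s (j + k) with
        | none => simp
        | some b =>
          simp only
          by_cases he : a = b
          · rw [if_pos he, if_pos he, ih (k + 1)]
            have h1 : i - (k + 1) = i - k - 1 := by ring
            have h2 : j + (k + 1) = j + k + 1 := by ring
            rw [h1, h2]; ring
          · rw [if_neg he, if_neg he]; ring
    · rw [if_neg hg, if_pos (by omega)]; ring

-- The pieces B assembles, written as ranges of absolute indices.
def pvLeft (c i : Int) (s : String) : List Char :=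
  (PySem.List.pyRange (i - c + 1) (i + 1) 1).filterMap (PySem.Str.pyGet? s)
def pvRight (c j : Int) (s : String) : List Char :=
  (PySem.List.pyRange j (j + c) 1).filterMap (PySem.Str.pyGet? s)

-- Shifting a range(0,k) comprehension to absolute indices.
theorem filterMap_pyRange_shift (c base : Int) (f : Int → Option Char) :
    (PySem.List.pyRange 0 c 1).filterMap (fun t => f (base + t)) =
      (PySem.List.pyRange base (base + c) 1).filterMap f := by
  rw [PySem.List.pyRange_one 0 c, PySem.List.pyRange_one base (base + c)]
  have : base + c - base = c := by ring
  rw [this]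
  simp [List.filterMap_map]

theorem pvLeft_succ (c i : Int) (s : String) (a : Char) (hc : 0 ≤ c)
    (ha : PySem.Str.pyGet? s i = some a) :
    pvLeft (c + 1) i s = pvLeft c (i - 1) s ++ [a] := by
  unfold pvLeft
  have h1 : i - (c + 1) + 1 = i - 1 - c + 1 := by ring
  rw [h1, PySem.List.pyRange_one_append (i - 1 - c + 1) i (i + 1) (by omega) (by omega),
      List.filterMap_append, PySem.List.pyRange_one_singleton]
  have h2 : i - 1 + 1 = i := by ring
  have ha' : PySem.List.pyGet? s.toList i = some a := by simpa [PySem.Str.pyGet?] using ha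
  rw [h2]
  simp [ha']

theorem pvRight_succ (c j : Int) (s : String) (b : Char) (hc : 0 ≤ c)
    (hb : PySem.Str.pyGet? s j = some b) :
    pvRight (c + 1) j s = b :: pvRight c (j + 1) s := by
  unfold pvRight
  rw [PySem.List.pyRange_one_cons (by omega : j < j + (c + 1))]
  have h1 : j + (c + 1) = j + 1 + c := by ring
  have hb' : PySem.List.pyGet? s.toList j = some b := by simpa [PySem.Str.pyGet?] using hb
  rw [h1]
  simp [hb']

-- Main invariant: A's recursion produces exactly left ++ subsequence ++ right
-- for the shadow count.
theorem go_eq_build (fuel : Nat) (i j : Int) (s : String) (sub : String) :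
    traverse_outwards_even_go fuel i j s sub =
      String.ofList (pvLeft (pvCnt fuel i j s) i s ++ sub.toList ++ pvRight (pvCnt fuel i j s) j s) := by
  induction fuel generalizing i j sub with
  | zero =>
    simp [traverse_outwards_even_go, pvCnt, pvLeft, pvRight]
  | succ n ih =>
    rw [traverse_outwards_even_go, pvCnt]
    by_cases hg : i < 0 ∨ j > PySem.Str.len s - 1
    · rw [if_pos hg, if_pos hg]
      simp [pvLeft, pvRight]
    · rw [if_neg hg, if_neg hg]
      cases hi : PySem.Str.pyGet? s i with
      | none =>
        simp [pvLeft, pvRight]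
      | some a =>
        cases hj : PySem.Str.pyGet? s j with
        | none =>
          simp [pvLeft, pvRight]
        | some b =>
          simp only
          by_cases he : a = b
          · rw [if_neg (by simp [he]), if_pos he, ih]
            rw [pvLeft_succ _ _ _ a (pvCnt_nonneg n (i-1) (j+1) s) hi,
                pvRight_succ _ _ _ b (pvCnt_nonneg n (i-1) (j+1) s) hj]
            simp [he]
          · rw [if_pos (by simp [he]), if_neg he]
            simp [pvLeft, pvRight]

-- ===== VERDICT (by name: the statement is the Claim_ definition above) =====
theorem traverse_outwards_even_spec : Claim_equal_traverse_outwards_even := by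
  intro i j s sub _ _
  unfold Spec_traverse_outwards_even traverse_outwards_even traverse_outwards_even_alt
  rw [go_eq_build]
  have hk : traverse_outwards_even_altCount ((PySem.Str.len s - j).toNat + 1) i j s 0
      = pvCnt ((PySem.Str.len s - j).toNat + 1) i j s := by
    rw [altCount_eq_cnt]; simp
  simp only [hk]
  set c := pvCnt ((PySem.Str.len s - j).toNat + 1) i j s with hc
  rw [filterMap_pyRange_shift c (i - c + 1), filterMap_pyRange_shift c j]
  have h1 : i - c + 1 + c = i + 1 := by ring
  rw [h1]
  rfl
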